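-- pv_equiv track=rewrite | github.com/steveo1287/SharkEdge | backend/main.py | sort_bookmakers
-- ===== SOURCE A (Python) =====
-- from typing import Any
--
-- BOOKMAKER_PRIORITY = [
--     "draftkings",
--     "fanduel",
--     "betmgm",
--     "williamhill_us",
--     "betrivers",
--     "espnbet",
--     "fanatics",
-- ]
--
-- def sort_bookmakers(bookmakers: list[dict[str, Any]]) -> list[dict[str, Any]]:
--     priority_map = {
--         bookmaker_key: index for index, bookmaker_key in enumerate(BOOKMAKER_PRIORITY)
--     }
--
--     return sorted(
--         bookmakers,
--         key=lambda bookmaker: (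
--             priority_map.get(bookmaker.get("key", ""), len(priority_map)),
--             bookmaker.get("title", ""),
--         ),
--     )
-- ===== SOURCE B (Python) =====
-- BOOKMAKER_PRIORITY = [
--     "draftkings",
--     "fanduel",
--     "betmgm",
--     "williamhill_us",
--     "betrivers",
--     "espnbet",
--     "fanatics",
-- ]
--
-- def sort_bookmakers(bookmakers):
--     # One pass into priority buckets (one per priority key, plus a trailing
--     # "other" bucket), then a stable title sort per bucket, concatenated.
--     n = len(BOOKMAKER_PRIORITY)
--     index = {key: i for i, key in enumerate(BOOKMAKER_PRIORITY)}
--     buckets = [[] for _ in range(n + 1)]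
--     for bookmaker in bookmakers:
--         buckets[index.get(bookmaker.get("key", ""), n)].append(bookmaker)
--     result = []
--     for bucket in buckets:
--         result.extend(sorted(bucket, key=lambda bookmaker: bookmaker.get("title", "")))
--     return result
-- ===== Notes on version B (the rewrite author's own statement) =====
-- stated objective: alternative
-- what changed: Replaces the single stable sort under a (priority, title) tuple key by a one-pass distribution into per-priority buckets (plus a trailing 'other' bucket), a stable title-only sort inside each bucket, and concatenation in priority order.
import Mathlib
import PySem

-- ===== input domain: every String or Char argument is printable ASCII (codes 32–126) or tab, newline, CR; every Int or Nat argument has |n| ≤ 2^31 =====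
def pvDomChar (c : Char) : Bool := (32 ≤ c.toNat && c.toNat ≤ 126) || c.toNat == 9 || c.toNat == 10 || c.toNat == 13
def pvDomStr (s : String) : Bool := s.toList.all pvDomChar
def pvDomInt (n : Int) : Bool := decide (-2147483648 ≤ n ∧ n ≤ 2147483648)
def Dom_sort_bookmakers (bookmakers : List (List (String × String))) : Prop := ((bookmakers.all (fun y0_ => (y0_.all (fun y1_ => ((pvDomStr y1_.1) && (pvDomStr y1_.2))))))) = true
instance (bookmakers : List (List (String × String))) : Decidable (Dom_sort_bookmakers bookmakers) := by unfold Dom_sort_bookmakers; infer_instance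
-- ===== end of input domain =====

-- B replaces the single stable sort under a (priority, title) tuple key by one
-- bucketing pass per priority (plus a trailing "other" bucket) followed by a
-- stable title sort inside each bucket; objective: alternative decomposition.

-- ===== PORT A =====
def BOOKMAKER_PRIORITY : List String :=
  ["draftkings", "fanduel", "betmgm", "williamhill_us", "betrivers", "espnbet", "fanatics"]

-- Python str '<' is code-point lexicographic = '<' on s.toList (PYSEM.md); titles are compared via .toList.
def sort_bookmakers (bookmakers : List (List (String × String))) : List (List (String × String)) :=
  let priority_map : PySem.Dict String Int :=
    (PySem.List.enumerate BOOKMAKER_PRIORITY).foldl (fun d p => d.insert p.2 p.1) PySem.Dict.empty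
  PySem.List.sorted2 bookmakers
    (fun bookmaker =>
      priority_map.getD (PySem.Dict.getD ⟨bookmaker⟩ "key" "") ((priority_map.items.length : Int)))
    (fun bookmaker => (PySem.Dict.getD ⟨bookmaker⟩ "title" "").toList) false

-- ===== PORT B =====
-- B-side helper: the index comprehension of Source B
def pvIndexB : PySem.Dict String Int :=
  (PySem.List.enumerate BOOKMAKER_PRIORITY).foldl (fun d p => d.insert p.2 p.1) PySem.Dict.empty

-- buckets[i].append(x) of Source B
def pvPut : Nat → List (String × String) → List (List (List (String × String))) → List (List (List (String × String)))
  | _, _, [] => []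
  | 0, x, b :: bs => (b ++ [x]) :: bs
  | n+1, x, b :: bs => b :: pvPut n x bs

def sort_bookmakers_alt (bookmakers : List (List (String × String))) : List (List (String × String)) :=
  let n := BOOKMAKER_PRIORITY.length
  let buckets :=
    bookmakers.foldl
      (fun bs bookmaker =>
        pvPut (pvIndexB.getD (PySem.Dict.getD ⟨bookmaker⟩ "key" "") ((n : Int))).toNat bookmaker bs)
      (List.replicate (n + 1) [])
  (buckets.map (fun bucket =>
      PySem.List.sorted bucket (fun bookmaker => (PySem.Dict.getD ⟨bookmaker⟩ "title" "").toList) false)).flatten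

-- ===== PRECONDITION & SPEC =====
def Spec_sort_bookmakers (bookmakers : List (List (String × String))) (out : List (List (String × String))) : Prop := out = sort_bookmakers_alt bookmakers
instance (bookmakers : List (List (String × String))) (out : List (List (String × String))) : Decidable (Spec_sort_bookmakers bookmakers out) := by unfold Spec_sort_bookmakers; infer_instance

-- ===== CLAIM (what is proved, stated in full; the proofs are below) =====
def Claim_equal_sort_bookmakers : Prop := ∀ (bookmakers : List (List (String × String))), Dom_sort_bookmakers bookmakers → Spec_sort_bookmakers bookmakers (sort_bookmakers bookmakers)

-- ===== LEMMAS AND PROOFS =====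

-- the priority key (A's tuple key, first component; = B's bucket index) and the title key
def pvPrio (b : List (String × String)) : Int :=
  pvIndexB.getD (PySem.Dict.getD ⟨b⟩ "key" "") 7

def pvTitle (b : List (String × String)) : List Char :=
  (PySem.Dict.getD ⟨b⟩ "title" "").toList

-- A's lexicographic comparison, as sorted2 builds it
def pvLtA (a b : List (String × String)) : Bool :=
  decide (pvPrio a < pvPrio b) || !decide (pvPrio b < pvPrio a) && decide (pvTitle a < pvTitle b)

def pvSortT (b : List (List (List (String × String)))) : List (List (String × String)) :=
  (b.map (fun bucket => PySem.List.sorted bucket (fun bm => (PySem.Dict.getD ⟨bm⟩ "title" "").toList) false)).flatten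

def pvPure (s : Int) (bs : List (List (List (String × String)))) : Prop :=
  ∀ j (h : j < bs.length), ∀ y ∈ bs[j], pvPrio y = s + j

lemma pvPrio_bounds (b : List (String × String)) : 0 ≤ pvPrio b ∧ pvPrio b < 8 := by
  unfold pvPrio
  have hpm : pvIndexB = ⟨[("draftkings",0),("fanduel",1),("betmgm",2),("williamhill_us",3),("betrivers",4),("espnbet",5),("fanatics",6)]⟩ := by decide
  rw [hpm]
  set k := PySem.Dict.getD ⟨b⟩ "key" "" with hk
  simp only [PySem.Dict.getD, PySem.Dict.get?, List.find?]
  cases "draftkings" == k <;> cases "fanduel" == k <;> cases "betmgm" == k <;>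
    cases "williamhill_us" == k <;> cases "betrivers" == k <;> cases "espnbet" == k <;>
    cases "fanatics" == k <;> simp

lemma insertBy_skip {α : Type} (before : α → α → Bool) (x : α) (A C : List α)
    (h : ∀ y ∈ A, before x y = false) :
    PySem.List.insertBy before x (A ++ C) = A ++ PySem.List.insertBy before x C := by
  induction A with
  | nil => simp
  | cons a as ih =>
    simp only [List.cons_append, PySem.List.insertBy, h a (by simp)]
    rw [if_neg (by simp), ih (fun y hy => h y (by simp [hy]))]

lemma insertBy_stop {α : Type} (before : α → α → Bool) (x : α) (B C : List α)
    (h : ∀ y ∈ C, before x y = true) :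
    PySem.List.insertBy before x (B ++ C) = PySem.List.insertBy before x B ++ C := by
  induction B with
  | nil =>
    cases C with
    | nil => simp
    | cons c cs => simp [PySem.List.insertBy, h c (by simp)]
  | cons b bs ih =>
    simp only [List.cons_append, PySem.List.insertBy]
    cases hbx : before x b with
    | true => simp
    | false => simp [ih]

lemma insertBy_congr {α : Type} (p q : α → α → Bool) (x : α) (ys : List α)
    (h : ∀ y ∈ ys, p x y = q x y) :
    PySem.List.insertBy p x ys = PySem.List.insertBy q x ys := by
  induction ys with
  | nil => rfl
  | cons y ys ih =>
    simp only [PySem.List.insertBy, h y (by simp)]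
    rw [ih (fun z hz => h z (by simp [hz]))]

lemma sorted_snoc {α κ : Type} [LT κ] [DecidableLT κ] (b : List α) (x : α) (key : α → κ) :
    PySem.List.sorted (b ++ [x]) key false =
      PySem.List.insertBy (fun a c => decide (key a < key c)) x (PySem.List.sorted b key false) := by
  rw [PySem.List.sorted_eq_foldl_insertBy, PySem.List.sorted_eq_foldl_insertBy, List.foldl_append]
  rfl

lemma insert_flatten (x : List (String × String)) :
    ∀ (bs : List (List (List (String × String)))) (s : Int) (p : Nat),
      pvPrio x = s + p → p < bs.length → pvPure s bs →
      PySem.List.insertBy pvLtA x (pvSortT bs) = pvSortT (pvPut p x bs) := by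
  intro bs
  induction bs with
  | nil => intro s p _ hp _; simp at hp
  | cons b bs ih =>
    intro s p hx hp hpure
    have hsort : pvSortT (b :: bs) = PySem.List.sorted b pvTitle false ++ pvSortT bs := rfl
    cases p with
    | zero =>
      have htail : ∀ y ∈ pvSortT bs, pvLtA x y = true := by
        intro y hy
        obtain ⟨l, hl, hyl⟩ := List.mem_flatten.1 hy
        obtain ⟨bucket, hb, rfl⟩ := List.mem_map.1 hl
        obtain ⟨j, hj, rfl⟩ := List.mem_iff_getElem.1 hb
        have hyb : y ∈ bs[j] := (PySem.List.mem_sorted _ _ _ _).1 hyl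
        have hpy : pvPrio y = s + (j + 1 : Nat) := by
          have := hpure (j+1) (by simp; omega) y (by simpa using hyb)
          simpa using this
        have hlt : pvPrio x < pvPrio y := by
          rw [hx, hpy]; push_cast; omega
        simp [pvLtA, hlt]
      rw [hsort, insertBy_stop _ _ _ _ htail]
      have hhead : ∀ y ∈ PySem.List.sorted b pvTitle false,
          pvLtA x y = (fun a c => decide (pvTitle a < pvTitle c)) x y := by
        intro y hy
        have hyb := (PySem.List.mem_sorted _ _ _ _).1 hy
        have hpy : pvPrio y = s := by simpa using hpure 0 (by simp) y hyb
        have hpx : pvPrio x = s := by simpa using hx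
        simp [pvLtA, hpx, hpy]
      rw [insertBy_congr pvLtA (fun a c => decide (pvTitle a < pvTitle c)) x _ hhead, ← sorted_snoc]
      rfl
    | succ n =>
      have hhead : ∀ y ∈ PySem.List.sorted b pvTitle false,
          pvLtA x y = false := by
        intro y hy
        have hyb := (PySem.List.mem_sorted _ _ _ _).1 hy
        have hpy : pvPrio y = s := by simpa using hpure 0 (by simp) y hyb
        have h1 : ¬ pvPrio x < pvPrio y := by rw [hx, hpy]; push_cast; omega
        have h2 : pvPrio y < pvPrio x := by rw [hx, hpy]; push_cast; omega
        simp [pvLtA, h1, h2]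
      have hshift : pvPure (s+1) bs := by
        intro j hj y hy
        have := hpure (j+1) (by simp; omega) y (by simpa using hy)
        simp at this
        omega
      rw [hsort, insertBy_skip _ _ _ _ hhead,
        ih (s+1) n (by push_cast at hx ⊢; omega) (by simp at hp; omega) hshift]
      rfl

lemma pvPut_length (p : Nat) (x : List (String × String)) (bs : List (List (List (String × String)))) :
    (pvPut p x bs).length = bs.length := by
  induction bs generalizing p with
  | nil => cases p <;> rfl
  | cons b bs ih => cases p <;> simp [pvPut, ih]

lemma pvPure_put (s : Int) (p : Nat) (x : List (String × String))
    (bs : List (List (List (String × String))))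
    (hx : pvPrio x = s + p) (hp : p < bs.length) (h : pvPure s bs) :
    pvPure s (pvPut p x bs) := by
  induction bs generalizing s p with
  | nil => simp at hp
  | cons b bs ih =>
    cases p with
    | zero =>
      intro j hj y hy
      cases j with
      | zero =>
        simp only [pvPut] at hy
        simp only [List.getElem_cons_zero] at hy
        rcases List.mem_append.1 hy with hyb | hyx
        · simpa using h 0 (by simp) y hyb
        · simp only [List.mem_singleton] at hyx
          subst hyx
          simpa using hx
      | succ j =>
        simp only [pvPut] at hj hy ⊢
        have := h (j+1) (by simpa using hj) y (by simpa using hy)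
        simpa using this
    | succ n =>
      intro j hj y hy
      cases j with
      | zero =>
        simp only [pvPut, List.getElem_cons_zero] at hy
        simpa using h 0 (by simp) y hy
      | succ j =>
        simp only [pvPut, List.length_cons, List.getElem_cons_succ] at hj hy
        have hshift : pvPure (s+1) bs := by
          intro i hi z hz
          have := h (i+1) (by simp; omega) z (by simpa using hz)
          simp at this; omega
        have := ih (s+1) n (by push_cast at hx ⊢; omega) (by simp at hp; omega) hshift j
          (by simpa [pvPut_length] using hj) y hy
        push_cast at this ⊢; omega

lemma fold_main (xs : List (List (String × String))) :
    ∀ (bs : List (List (List (String × String)))), pvPure 0 bs → bs.length = 8 →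
      xs.foldl (fun acc x => PySem.List.insertBy pvLtA x acc) (pvSortT bs) =
        pvSortT (xs.foldl (fun bs x => pvPut (pvPrio x).toNat x bs) bs) := by
  induction xs with
  | nil => intro bs _ _; rfl
  | cons x xs ih =>
    intro bs hpure hlen
    simp only [List.foldl_cons]
    rw [insert_flatten x bs 0 (pvPrio x).toNat
        (by have := pvPrio_bounds x; omega)
        (by have := pvPrio_bounds x; omega)
        hpure]
    exact ih _ (pvPure_put 0 (pvPrio x).toNat x bs (by have := pvPrio_bounds x; omega)
        (by have := pvPrio_bounds x; omega) hpure)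
      (by rw [pvPut_length, hlen])

-- ===== VERDICT (by name: the statement is the Claim_ definition above) =====
theorem sort_bookmakers_spec : Claim_equal_sort_bookmakers := by
  intro bms _
  show sort_bookmakers bms = sort_bookmakers_alt bms
  have hA : sort_bookmakers bms = bms.foldl (fun acc x => PySem.List.insertBy pvLtA x acc) [] := rfl
  have hB : sort_bookmakers_alt bms =
      pvSortT (bms.foldl (fun bs x => pvPut (pvPrio x).toNat x bs) (List.replicate 8 [])) := rfl
  rw [hA, hB]
  have h0 : pvSortT (List.replicate 8 []) = ([] : List (List (String × String))) := rfl
  rw [← h0]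
  exact fold_main bms (List.replicate 8 []) (by intro j hj y hy; simp at hj; interval_cases j <;> simp at hy) (by simp)
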